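-- pv_equiv track=rewrite | github.com/KuiyuanFu/PythonLeetCode | .leetcode/546.remove-boxes.py | removeBoxes
-- ===== SOURCE A (Python) =====
-- from typing import List
--
-- def removeBoxes(boxes: List[int]) -> int:
--     length = len(boxes)
--     dp = [[[0 for _ in range(length)] for _ in range(length)]
--           for _ in range(length)]
--
--     def recur(l, r, length):
--         if l > r:
--             return length * length
--
--         if dp[l][r][length] > 0:
--             return dp[l][r][length]
--         res = (length + 1)**2 + recur(l + 1, r, 0)
--         for i in range(l + 1, r + 1):
--             if boxes[i] == boxes[l]:
--                 resT = recur(l + 1, i - 1, 0) + recur(i, r, length + 1)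
--                 res = max(resT, res)
--         dp[l][r][length] = res
--         return res
--
--     return recur(0, len(boxes) - 1, 0)
--     pass
-- ===== SOURCE B (Python) =====
-- from typing import List
--
-- def removeBoxes(boxes: List[int]) -> int:
--     # bottom-up interval DP; dp[(l, r, k)] = best score for boxes[l..r] with k
--     # extra boxes of color boxes[l] already attached on the left's right side
--     n = len(boxes)
--     if n == 0:
--         return 0
--     dp = {}
--     for l in range(n - 1, -1, -1):
--         for r in range(l, n):
--             for k in range(n - (r - l)):
--                 best = (k + 1) ** 2 + dp.get((l + 1, r, 0), 0)
--                 for i in range(l + 1, r + 1):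
--                     if boxes[i] == boxes[l]:
--                         best = max(best, dp.get((l + 1, i - 1, 0), 0)
--                                    + dp.get((i, r, k + 1), 0))
--                 dp[(l, r, k)] = best
--     return dp[(0, n - 1, 0)]
-- ===== Notes on version B (the rewrite author's own statement) =====
-- stated objective: alternative
-- what changed: Replaced the memoized top-down recursion with an explicit bottom-up interval DP that fills a dictionary dp[(l,r,k)] by decreasing l, applying the identical transition; no recursion and no cache-check remain.
import Mathlib
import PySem

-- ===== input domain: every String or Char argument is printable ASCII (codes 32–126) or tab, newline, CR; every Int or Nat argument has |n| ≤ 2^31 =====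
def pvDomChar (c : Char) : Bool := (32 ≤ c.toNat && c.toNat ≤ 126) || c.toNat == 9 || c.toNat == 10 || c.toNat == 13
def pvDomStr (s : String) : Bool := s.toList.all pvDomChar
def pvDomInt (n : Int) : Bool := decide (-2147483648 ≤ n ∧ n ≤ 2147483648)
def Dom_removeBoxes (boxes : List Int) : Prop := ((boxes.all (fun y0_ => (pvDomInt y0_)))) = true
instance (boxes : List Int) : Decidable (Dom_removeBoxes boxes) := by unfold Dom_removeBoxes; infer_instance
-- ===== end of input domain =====

-- B replaces A's memoized top-down recursion by an explicit bottom-up interval DP over the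
-- same state space (objective: alternative decomposition, same asymptotic cost).

-- ===== PORT A =====
-- A's `dp` array is a pure memo cache: a cached entry always holds exactly the value the
-- recursion recomputes, so the port performs the same recursion without the cache.
-- `fuel` only bounds the recursion depth (the width r - l strictly shrinks at every
-- recursive call, so fuel = boxes.length + 1 is never exhausted); every branch, the
-- loop over i, and the order of max(resT, res) follow A's `recur` line by line.
def recurA (boxes : List Int) : Nat → Int → Int → Int → Int
  | 0, _, _, _ => 0
  | fuel + 1, l, r, length =>
    if l > r then length * length
    else
      (PySem.List.pyRange (l + 1) (r + 1) 1).foldl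
        (fun res i =>
          if PySem.List.pyGet? boxes i == PySem.List.pyGet? boxes l then
            max (recurA boxes fuel (l + 1) (i - 1) 0 + recurA boxes fuel i r (length + 1)) res
          else res)
        ((length + 1) ^ 2 + recurA boxes fuel (l + 1) r 0)

def removeBoxes (boxes : List Int) : Int :=
  recurA boxes (boxes.length + 1) 0 ((boxes.length : Int) - 1) 0

-- ===== PORT B =====
-- helpers = the loop bodies of Source B's nested for-loops (innermost first)
def altCell (boxes : List Int) (d : PySem.Dict (Int × Int × Int) Int) (l r k : Int) : Int :=
  (PySem.List.pyRange (l + 1) (r + 1) 1).foldl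
    (fun best i =>
      if PySem.List.pyGet? boxes i == PySem.List.pyGet? boxes l then
        max best (d.getD (l + 1, i - 1, 0) 0 + d.getD (i, r, k + 1) 0)
      else best)
    ((k + 1) ^ 2 + d.getD (l + 1, r, 0) 0)

def altBodyK (boxes : List Int) (d : PySem.Dict (Int × Int × Int) Int) (l r k : Int) :
    PySem.Dict (Int × Int × Int) Int :=
  d.insert (l, r, k) (altCell boxes d l r k)

def altBodyR (boxes : List Int) (n : Int) (d : PySem.Dict (Int × Int × Int) Int) (l r : Int) :
    PySem.Dict (Int × Int × Int) Int :=
  (PySem.List.pyRange 0 (n - (r - l)) 1).foldl (fun d k => altBodyK boxes d l r k) d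

def altBodyL (boxes : List Int) (n : Int) (d : PySem.Dict (Int × Int × Int) Int) (l : Int) :
    PySem.Dict (Int × Int × Int) Int :=
  (PySem.List.pyRange l n 1).foldl (fun d r => altBodyR boxes n d l r) d

def removeBoxes_alt (boxes : List Int) : Int :=
  let n : Int := (boxes.length : Int)
  if n == 0 then 0
  else
    ((PySem.List.pyRange (n - 1) (-1) (-1)).foldl (fun d l => altBodyL boxes n d l)
        (PySem.Dict.empty : PySem.Dict (Int × Int × Int) Int)).getD (0, n - 1, 0) 0

-- ===== PRECONDITION & SPEC =====
def Spec_removeBoxes (boxes : List Int) (out : Int) : Prop := out = removeBoxes_alt boxes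
instance (boxes : List Int) (out : Int) : Decidable (Spec_removeBoxes boxes out) := by unfold Spec_removeBoxes; infer_instance

-- ===== CLAIM (what is proved, stated in full; the proofs are below) =====
def Claim_equal_removeBoxes : Prop := ∀ (boxes : List Int), Dom_removeBoxes boxes → Spec_removeBoxes boxes (removeBoxes boxes)

-- ===== LEMMAS AND PROOFS =====

-- canonical value of A's recursion at a state, with just enough fuel
def FF (boxes : List Int) (l r k : Int) : Int :=
  recurA boxes ((r + 1 - l).toNat + 1) l r k

def stepF (boxes : List Int) (l r k : Int) (res i : Int) : Int :=
  if PySem.List.pyGet? boxes i == PySem.List.pyGet? boxes l then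
    max (FF boxes (l + 1) (i - 1) 0 + FF boxes i r (k + 1)) res
  else res

theorem recurA_succ (boxes : List Int) (fuel : Nat) (l r k : Int) :
    recurA boxes (fuel + 1) l r k =
      if l > r then k * k
      else
        (PySem.List.pyRange (l + 1) (r + 1) 1).foldl
          (fun res i =>
            if PySem.List.pyGet? boxes i == PySem.List.pyGet? boxes l then
              max (recurA boxes fuel (l + 1) (i - 1) 0 + recurA boxes fuel i r (k + 1)) res
            else res)
          ((k + 1) ^ 2 + recurA boxes fuel (l + 1) r 0) := rfl

theorem FF_base (boxes : List Int) (l r k : Int) (h : l > r) : FF boxes l r k = k * k := by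
  unfold FF
  rw [recurA_succ, if_pos h]

theorem recurA_succ_eq (boxes : List Int) (fuel : Nat) (l r k : Int) (hlr : ¬ l > r)
    (hsub : ∀ l' r' k' : Int, (r' + 1 - l').toNat ≤ (r - l).toNat →
      recurA boxes fuel l' r' k' = FF boxes l' r' k') :
    recurA boxes (fuel + 1) l r k =
      (PySem.List.pyRange (l + 1) (r + 1) 1).foldl (stepF boxes l r k)
        ((k + 1) ^ 2 + FF boxes (l + 1) r 0) := by
  rw [recurA_succ, if_neg hlr]
  rw [hsub (l + 1) r 0 (by omega)]
  apply PySem.List.foldl_congr_mem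
  intro acc i hi
  rw [PySem.List.mem_pyRange_one] at hi
  unfold stepF
  rw [hsub (l + 1) (i - 1) 0 (by omega), hsub i r (k + 1) (by omega)]

theorem recurA_eq_FF (boxes : List Int) :
    ∀ (fuel : Nat) (l r k : Int), (r + 1 - l).toNat < fuel →
      recurA boxes fuel l r k = FF boxes l r k := by
  intro fuel
  induction fuel using Nat.strong_induction_on with
  | _ fuel IH =>
    intro l r k h
    match fuel, h with
    | fuel + 1, h =>
      by_cases hlr : l > r
      · rw [recurA_succ, if_pos hlr, FF_base boxes l r k hlr]
      · have hK : (r + 1 - l).toNat = (r - l).toNat + 1 := by omega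
        have e1 := recurA_succ_eq boxes fuel l r k hlr
          (fun l' r' k' hm => IH fuel (by omega) l' r' k' (by omega))
        have e2 := recurA_succ_eq boxes ((r - l).toNat + 1) l r k hlr
          (fun l' r' k' hm => IH ((r - l).toNat + 1) (by omega) l' r' k' (by omega))
        rw [e1]
        rw [show FF boxes l r k = recurA boxes ((r - l).toNat + 1 + 1) l r k from by
          unfold FF; rw [hK]]
        rw [e2]

-- the "done" region predicates over dict keys (l, r, k)
abbrev ValidP (n : Int) (key : Int × Int × Int) : Prop :=
  0 ≤ key.1 ∧ key.1 ≤ key.2.1 ∧ key.2.1 < n ∧ 0 ≤ key.2.2 ∧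
    key.2.2 + (key.2.1 - key.1 + 1) ≤ n

def regL (n lo : Int) (key : Int × Int × Int) : Bool :=
  decide (lo ≤ key.1 ∧ ValidP n key)

def regR (n l r : Int) (key : Int × Int × Int) : Bool :=
  decide ((l + 1 ≤ key.1 ∨ (key.1 = l ∧ key.2.1 < r)) ∧ ValidP n key)

def regK (n l r kk : Int) (key : Int × Int × Int) : Bool :=
  decide ((l + 1 ≤ key.1 ∨ (key.1 = l ∧ key.2.1 < r) ∨
    (key.1 = l ∧ key.2.1 = r ∧ key.2.2 < kk)) ∧ ValidP n key)

def DInv (boxes : List Int) (p : (Int × Int × Int) → Bool)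
    (d : PySem.Dict (Int × Int × Int) Int) : Prop :=
  ∀ key : Int × Int × Int, d.getD key 0 = if p key then FF boxes key.1 key.2.1 key.2.2 else 0

theorem DInv_congr (boxes : List Int) (p q : (Int × Int × Int) → Bool)
    (d : PySem.Dict (Int × Int × Int) Int) (h : ∀ key, p key = q key) (hi : DInv boxes p d) :
    DInv boxes q d := by
  intro key; rw [← h key]; exact hi key

-- unfolding FF one level (the recurrence it satisfies)
theorem FF_unfold (boxes : List Int) (l r k : Int) (hlr : l ≤ r) :
    FF boxes l r k =
      (PySem.List.pyRange (l + 1) (r + 1) 1).foldl (stepF boxes l r k)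
        ((k + 1) ^ 2 + FF boxes (l + 1) r 0) := by
  have hK : (r + 1 - l).toNat = (r - l).toNat + 1 := by omega
  rw [show FF boxes l r k = recurA boxes ((r - l).toNat + 1 + 1) l r k from by
    unfold FF; rw [hK]]
  exact recurA_succ_eq boxes ((r - l).toNat + 1) l r k (by omega)
    (fun l' r' k' hm => recurA_eq_FF boxes ((r - l).toNat + 1) l' r' k' (by omega))

-- Source B's innermost computation produces exactly FF l r k, given the invariant
theorem cell_eq (boxes : List Int) (n : Int) (d : PySem.Dict (Int × Int × Int) Int)
    (p : (Int × Int × Int) → Bool) (hInv : DInv boxes p d) (l r k : Int)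
    (hup : ∀ key, ValidP n key → l + 1 ≤ key.1 → p key = true)
    (hval : ∀ key, p key = true → ValidP n key)
    (hl : 0 ≤ l) (hlr : l ≤ r) (hr : r < n) (hk : 0 ≤ k)
    (hkn : k + (r - l + 1) ≤ n) :
    altCell boxes d l r k = FF boxes l r k := by
  have lookup : ∀ a b c : Int, l + 1 ≤ a → a ≤ b → b < n → 0 ≤ c → c + (b - a + 1) ≤ n →
      d.getD (a, b, c) 0 = FF boxes a b c := by
    intro a b c h1 h2 h3 h4 h5
    rw [hInv (a, b, c),
      if_pos (hup (a, b, c) ⟨by omega, by dsimp only; omega, by dsimp only; omega,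
        by dsimp only; omega, by dsimp only; omega⟩ h1)]
  have lookup0 : ∀ a b : Int, b < a → d.getD (a, b, 0) 0 = FF boxes a b 0 := by
    intro a b hab
    rw [FF_base boxes a b 0 (by omega), hInv (a, b, 0)]
    have hp : p (a, b, 0) = false := by
      by_contra h
      have hv := hval (a, b, 0) (by revert h; cases p (a, b, 0) <;> simp)
      obtain ⟨_, h2, _⟩ := hv
      dsimp only at h2
      omega
    rw [hp]
    simp
  have hinit : d.getD (l + 1, r, 0) 0 = FF boxes (l + 1) r 0 := by
    by_cases hc : l + 1 ≤ r
    · exact lookup (l + 1) r 0 le_rfl hc hr le_rfl (by omega)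
    · exact lookup0 (l + 1) r (by omega)
  rw [FF_unfold boxes l r k hlr]
  unfold altCell
  rw [hinit]
  apply PySem.List.foldl_congr_mem
  intro acc i hi
  rw [PySem.List.mem_pyRange_one] at hi
  unfold stepF
  have h1 : d.getD (l + 1, i - 1, 0) 0 = FF boxes (l + 1) (i - 1) 0 := by
    by_cases hc : l + 1 ≤ i - 1
    · exact lookup (l + 1) (i - 1) 0 le_rfl hc (by omega) le_rfl (by omega)
    · exact lookup0 (l + 1) (i - 1) (by omega)
  have h2 : d.getD (i, r, k + 1) 0 = FF boxes i r (k + 1) :=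
    lookup i r (k + 1) (by omega) (by omega) hr (by omega) (by omega)
  rw [h1, h2]
  split
  · exact max_comm _ _
  · rfl

-- the k-loop of Source B fills row (l, r) for every admissible k
theorem loopK (boxes : List Int) (n l r : Int) (hl : 0 ≤ l) (hlr : l ≤ r) (hr : r < n) :
    ∀ (c : Nat) (kk : Int) (d : PySem.Dict (Int × Int × Int) Int),
      (n - (r - l) - kk).toNat = c → 0 ≤ kk → DInv boxes (regK n l r kk) d →
      DInv boxes (regK n l r (n - (r - l)))
        ((PySem.List.pyRange kk (n - (r - l)) 1).foldl (fun d k => altBodyK boxes d l r k) d) := by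
  intro c
  induction c with
  | zero =>
    intro kk d hc hk0 hInv
    rw [PySem.List.pyRange_one_eq_nil (by omega)]
    refine DInv_congr boxes _ _ d (fun key => ?_) hInv
    rcases key with ⟨a, b, c2⟩
    simp only [regK]
    rw [decide_eq_decide]
    unfold ValidP
    dsimp only
    omega
  | succ m IH =>
    intro kk d hc hk0 hInv
    rw [PySem.List.pyRange_one_cons (by omega), List.foldl_cons]
    refine IH (kk + 1) _ (by omega) (by omega) ?_
    unfold altBodyK
    have hcell : altCell boxes d l r kk = FF boxes l r kk := by
      refine cell_eq boxes n d _ hInv l r kk ?_ ?_ hl hlr hr hk0 (by omega)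
      · intro key hv h1
        simp only [regK, decide_eq_true_eq]
        exact ⟨Or.inl h1, hv⟩
      · intro key h
        simp only [regK, decide_eq_true_eq] at h
        exact h.2
    rw [hcell]
    intro key
    by_cases hkey : key = (l, r, kk)
    · subst hkey
      rw [PySem.Dict.getD_insert, if_pos rfl]
      have hreg : regK n l r (kk + 1) (l, r, kk) = true := by
        simp only [regK, decide_eq_true_eq]
        unfold ValidP
        dsimp only
        simp only [true_and]
        omega
      rw [hreg]
      simp
    · rw [PySem.Dict.getD_insert, if_neg hkey, hInv key]
      have hreg : regK n l r kk key = regK n l r (kk + 1) key := by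
        rcases key with ⟨a, b, c2⟩
        have hne : ¬(a = l ∧ b = r ∧ c2 = kk) := by
          intro h
          exact hkey (by simp [h.1, h.2.1, h.2.2])
        simp only [regK]
        rw [decide_eq_decide]
        unfold ValidP
        dsimp only
        omega
      rw [← hreg]

-- the r-loop of Source B fills all rows (l, r), r ∈ [l, n)
theorem loopR (boxes : List Int) (n l : Int) (hl : 0 ≤ l) :
    ∀ (c : Nat) (r : Int) (d : PySem.Dict (Int × Int × Int) Int),
      (n - r).toNat = c → l ≤ r → DInv boxes (regR n l r) d →
      DInv boxes (regR n l n)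
        ((PySem.List.pyRange r n 1).foldl (fun d r => altBodyR boxes n d l r) d) := by
  intro c
  induction c with
  | zero =>
    intro r d hc hlr hInv
    rw [PySem.List.pyRange_one_eq_nil (by omega)]
    refine DInv_congr boxes _ _ d (fun key => ?_) hInv
    rcases key with ⟨a, b, c2⟩
    simp only [regR]
    rw [decide_eq_decide]
    unfold ValidP
    dsimp only
    omega
  | succ m IH =>
    intro r d hc hlr hInv
    rw [PySem.List.pyRange_one_cons (by omega), List.foldl_cons]
    refine IH (r + 1) _ (by omega) (by omega) ?_
    unfold altBodyR
    have hstart : DInv boxes (regK n l r 0) d := by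
      refine DInv_congr boxes _ _ d (fun key => ?_) hInv
      rcases key with ⟨a, b, c2⟩
      simp only [regR, regK]
      rw [decide_eq_decide]
      unfold ValidP
      dsimp only
      omega
    have hend := loopK boxes n l r hl hlr (by omega) (n - (r - l) - 0).toNat 0 d rfl le_rfl hstart
    refine DInv_congr boxes _ _ _ (fun key => ?_) hend
    rcases key with ⟨a, b, c2⟩
    simp only [regK, regR]
    rw [decide_eq_decide]
    unfold ValidP
    dsimp only
    omega

-- the outer l-loop of Source B, l from n-1 down to 0
theorem loopL (boxes : List Int) (n : Int) :
    ∀ (c : Nat) (l : Int) (d : PySem.Dict (Int × Int × Int) Int),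
      (l + 1).toNat = c → -1 ≤ l → l < n → DInv boxes (regL n (l + 1)) d →
      DInv boxes (regL n 0)
        ((PySem.List.pyRange l (-1) (-1)).foldl (fun d l => altBodyL boxes n d l) d) := by
  intro c
  induction c with
  | zero =>
    intro l d hc hm1 hln hInv
    rw [PySem.List.pyRange_neg_one_eq_nil (by omega)]
    refine DInv_congr boxes _ _ d (fun key => ?_) hInv
    rw [show l + 1 = 0 from by omega]
  | succ m IH =>
    intro l d hc hm1 hln hInv
    rw [PySem.List.pyRange_neg_one_cons (by omega), List.foldl_cons]
    have hl0 : 0 ≤ l := by omega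
    refine IH (l - 1) _ (by omega) (by omega) (by omega) ?_
    rw [show l - 1 + 1 = l from by omega]
    unfold altBodyL
    have hstart : DInv boxes (regR n l l) d := by
      refine DInv_congr boxes _ _ d (fun key => ?_) hInv
      rcases key with ⟨a, b, c2⟩
      simp only [regL, regR]
      rw [decide_eq_decide]
      unfold ValidP
      dsimp only
      omega
    have hend := loopR boxes n l hl0 (n - l).toNat l d rfl le_rfl hstart
    refine DInv_congr boxes _ _ _ (fun key => ?_) hend
    rcases key with ⟨a, b, c2⟩
    simp only [regR, regL]
    rw [decide_eq_decide]
    unfold ValidP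
    dsimp only
    omega

theorem removeBoxes_spec' : ∀ (boxes : List Int), removeBoxes boxes = removeBoxes_alt boxes := by
  intro boxes
  by_cases hnil : boxes = []
  · subst hnil
    rfl
  · have hlen : 0 < boxes.length := List.length_pos_iff.mpr hnil
    unfold removeBoxes removeBoxes_alt
    have hne : (((boxes.length : Int)) == 0) = false := by
      simp
      omega
    simp only [hne, Bool.false_eq_true, if_false]
    have h0 : DInv boxes (regL (boxes.length : Int) ((boxes.length : Int) - 1 + 1))
        (PySem.Dict.empty : PySem.Dict (Int × Int × Int) Int) := by
      intro key
      rw [PySem.Dict.getD_empty]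
      have : regL (boxes.length : Int) ((boxes.length : Int) - 1 + 1) key = false := by
        rcases key with ⟨a, b, c2⟩
        simp only [regL, decide_eq_false_iff_not]
        unfold ValidP
        dsimp only
        omega
      rw [this]
      simp
    have hfin := loopL boxes (boxes.length : Int) ((boxes.length : Int) - 1 + 1).toNat
      ((boxes.length : Int) - 1) PySem.Dict.empty rfl (by omega) (by omega) h0
    rw [hfin (0, (boxes.length : Int) - 1, 0)]
    have hreg : regL (boxes.length : Int) 0 (0, (boxes.length : Int) - 1, 0) = true := by
      simp only [regL, decide_eq_true_eq]
      unfold ValidP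
      dsimp only
      omega
    rw [hreg]
    simp only [if_true]
    exact recurA_eq_FF boxes (boxes.length + 1) 0 ((boxes.length : Int) - 1) 0 (by omega)

-- ===== VERDICT (by name: the statement is the Claim_ definition above) =====
theorem removeBoxes_spec : Claim_equal_removeBoxes := by
  intro boxes _hdom
  unfold Spec_removeBoxes
  exact removeBoxes_spec' boxes
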